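-- pv_equiv track=rewrite | github.com/PeterOlaleru/function-prediction | scripts/compact_notebook_sources.py | compact_code_cell_source
-- ===== SOURCE A (Python) =====
-- def _is_blank_line(s: str) -> bool:
--     return s.strip() == ""
--
-- def _indent_level(s: str) -> int:
--     # Count leading spaces/tabs. Tabs count as 4 for heuristics.
--     expanded = s.replace("\t", "    ")
--     return len(expanded) - len(expanded.lstrip(" "))
--
-- def _is_import(s: str) -> bool:
--     st = s.lstrip()
--     return st.startswith("import ") or st.startswith("from ")
--
-- def _is_def_like(s: str) -> bool:
--     st = s.lstrip()
--     return st.startswith("def ") or st.startswith("class ") or st.startswith("@")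
--
-- def compact_code_cell_source(source: list[str]) -> list[str]:
--     # Normalise line endings and trim trailing whitespace.
--     lines = [str(x).replace("\r\n", "\n").replace("\r", "\n").rstrip(" \t\n") for x in source]
--
--     # Remove leading/trailing blanks early.
--     while lines and _is_blank_line(lines[0]):
--         lines.pop(0)
--     while lines and _is_blank_line(lines[-1]):
--         lines.pop()
--     if not lines:
--         return []
--
--     out: list[str] = []
--     n = len(lines)
--     for i, cur in enumerate(lines):
--         if not _is_blank_line(cur):
--             out.append(cur)
--             continue
--
--         # Decide whether to keep a single blank line here.
--         # Look for prev/next nonblank.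
--         j = i - 1
--         while j >= 0 and _is_blank_line(lines[j]):
--             j -= 1
--         k = i + 1
--         while k < n and _is_blank_line(lines[k]):
--             k += 1
--
--         if j < 0 or k >= n:
--             continue
--
--         prev = lines[j]
--         nxt = lines[k]
--
--         prev_indent = _indent_level(prev)
--         next_indent = _indent_level(nxt)
--
--         # Keep a single blank line when we dedent to a new top-level def/class/decorator.
--         # This avoids mashing top-level defs together when the last line of the previous def is indented.
--         if next_indent == 0 and _is_def_like(nxt) and prev_indent > 0:
--             if out and out[-1] != "":
--                 out.append("")
--             continue
--
--         # Drop blank lines inside indented blocks.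
--         if prev_indent > 0 or next_indent > 0:
--             continue
--
--         # Keep exactly one blank line after an import block.
--         if _is_import(prev) and not _is_import(nxt):
--             if out and out[-1] != "":
--                 out.append("")
--             continue
--
--         # Keep blank line between top-level defs/decorators.
--         if _is_def_like(nxt) or _is_def_like(prev):
--             if out and out[-1] != "":
--                 out.append("")
--             continue
--
--         # Otherwise: remove (this kills the "blank line between every statement" formatting).
--         continue
--
--     # Collapse any remaining consecutive blanks (defensive).
--     final: list[str] = []
--     prev_blank = False
--     for ln in out:
--         is_blank = _is_blank_line(ln)
--         if is_blank and prev_blank: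
--             continue
--         final.append("") if is_blank else final.append(ln)
--         prev_blank = is_blank
--
--     # Trim again.
--     while final and _is_blank_line(final[0]):
--         final.pop(0)
--     while final and _is_blank_line(final[-1]):
--         final.pop()
--
--     return final
-- ===== SOURCE B (Python) =====
-- def _is_blank_line(s: str) -> bool:
--     return s.strip() == ""
--
-- def _indent_level(s: str) -> int:
--     expanded = s.replace("\t", "    ")
--     return len(expanded) - len(expanded.lstrip(" "))
--
-- def _is_import(s: str) -> bool:
--     st = s.lstrip()
--     return st.startswith("import ") or st.startswith("from ")
--
-- def _is_def_like(s: str) -> bool: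
--     st = s.lstrip()
--     return st.startswith("def ") or st.startswith("class ") or st.startswith("@")
--
-- def _keep_blank(prev: str, nxt: str) -> bool:
--     # Single decision for a whole blank run between nonblank lines prev and nxt.
--     prev_indent = _indent_level(prev)
--     next_indent = _indent_level(nxt)
--     if next_indent == 0 and _is_def_like(nxt) and prev_indent > 0:
--         return True
--     if prev_indent > 0 or next_indent > 0:
--         return False
--     if _is_import(prev) and not _is_import(nxt):
--         return True
--     return _is_def_like(nxt) or _is_def_like(prev)
--
-- def compact_code_cell_source(source: list[str]) -> list[str]:
--     # One forward pass: carry the last nonblank line and whether a blank gap is pending.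
--     lines = [str(x).replace("\r\n", "\n").replace("\r", "\n").rstrip(" \t\n") for x in source]
--     out: list[str] = []
--     prev = None
--     gap = False
--     for cur in lines:
--         if _is_blank_line(cur):
--             gap = True
--             continue
--         if prev is not None and gap and _keep_blank(prev, cur):
--             out.append("")
--         out.append(cur)
--         prev = cur
--         gap = False
--     return out
-- ===== Notes on version B (the rewrite author's own statement) =====
-- stated objective: simpler
-- what changed: Replaced the trim/scan/collapse pipeline (per blank line A rescans left and right for the nearest nonblank, then runs a defensive collapse pass and re-trims) by a single forward pass that carries the last nonblank line and a pending-gap flag and decides each blank run once; this also removes A's worst-case quadratic rescans of blank runs, though a timing run read only 1.21x on the generated inputs.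
import Mathlib
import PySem

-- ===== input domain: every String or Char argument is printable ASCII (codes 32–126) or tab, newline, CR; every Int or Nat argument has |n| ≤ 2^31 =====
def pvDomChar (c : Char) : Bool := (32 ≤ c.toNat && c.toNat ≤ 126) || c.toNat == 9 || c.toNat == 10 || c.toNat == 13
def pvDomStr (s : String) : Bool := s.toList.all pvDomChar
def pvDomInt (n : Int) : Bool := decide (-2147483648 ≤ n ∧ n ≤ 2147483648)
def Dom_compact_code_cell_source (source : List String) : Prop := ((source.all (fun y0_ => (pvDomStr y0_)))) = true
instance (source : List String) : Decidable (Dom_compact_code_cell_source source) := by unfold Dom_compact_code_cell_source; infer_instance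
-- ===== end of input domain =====

-- B replaces A's per-blank left/right rescans plus collapse/trim/defensive passes by one forward pass carrying (last nonblank, pending-gap); simpler single-pass structure, same return value.

-- ===== PORT A =====
-- shared line helpers (identical in Source A and Source B)

-- str(x).replace("\r\n","\n").replace("\r","\n").rstrip(" \t\n") ; rstrip(chars) hand-ported as
-- reverse/dropWhile/reverse over the explicit char set (exact for str.rstrip(" \t\n"))
def normLine (s : String) : String :=
  let r := PySem.Chars.replace (PySem.Chars.replace s.toList ['\r', '\n'] ['\n']) ['\r'] ['\n']
  String.ofList ((r.reverse.dropWhile (fun c => c = ' ' || c = '\t' || c = '\n')).reverse)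

-- _is_blank_line: s.strip() == ""
def isBlankLine (s : String) : Bool := (PySem.Chars.strip s.toList).isEmpty

-- _indent_level: len(expanded) - len(expanded.lstrip(" ")) ; lstrip(" ") hand-ported as dropWhile (· = ' ') (exact)
def indentLevel (s : String) : Int :=
  let expanded := PySem.Chars.replace s.toList ['\t'] [' ', ' ', ' ', ' ']
  (expanded.length : Int) - ((expanded.dropWhile (fun c => c = ' ')).length : Int)

-- _is_import
def isImport (s : String) : Bool :=
  let st := PySem.Chars.lstrip s.toList
  PySem.Chars.startswith st "import ".toList || PySem.Chars.startswith st "from ".toList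

-- _is_def_like
def isDefLike (s : String) : Bool :=
  let st := PySem.Chars.lstrip s.toList
  PySem.Chars.startswith st "def ".toList || PySem.Chars.startswith st "class ".toList ||
    PySem.Chars.startswith st "@".toList

-- while lines and _is_blank_line(lines[0]): lines.pop(0)
def popLeading (ls : List String) : List String := ls.dropWhile isBlankLine

-- while lines and _is_blank_line(lines[-1]): lines.pop()  (pop trailing blanks, ported via reverse; exact)
def popTrailing (ls : List String) : List String := (ls.reverse.dropWhile isBlankLine).reverse

-- j = i - 1 ; while j >= 0 and _is_blank_line(lines[j]): j -= 1
def scanPrev (lines : List String) (j : Int) : Int :=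
  if h : 0 ≤ j ∧ isBlankLine (PySem.List.pyGetD lines j "") then scanPrev lines (j - 1) else j
termination_by (j + 1).toNat
decreasing_by omega

-- k = i + 1 ; while k < n and _is_blank_line(lines[k]): k += 1
def scanNext (lines : List String) (k : Int) : Int :=
  if h : k < PySem.List.len lines ∧ isBlankLine (PySem.List.pyGetD lines k "") then scanNext lines (k + 1)
  else k
termination_by (PySem.List.len lines - k).toNat
decreasing_by simp only [PySem.List.len_eq] at *; omega

-- if out and out[-1] != "": out.append("")
def appendBlankIf (out : List String) : List String :=
  match out.getLast? with
  | some x => if x ≠ "" then out ++ [""] else out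
  | none => out

-- body of `for i, cur in enumerate(lines)`
def aLoopBody (lines : List String) (out : List String) (ic : Int × String) : List String :=
  if !(isBlankLine ic.2) then out ++ [ic.2]
  else
    let j := scanPrev lines (ic.1 - 1)
    let k := scanNext lines (ic.1 + 1)
    if j < 0 ∨ PySem.List.len lines ≤ k then out
    else
      let prev := PySem.List.pyGetD lines j ""
      let nxt := PySem.List.pyGetD lines k ""
      let prevIndent := indentLevel prev
      let nextIndent := indentLevel nxt
      if nextIndent = 0 ∧ isDefLike nxt ∧ prevIndent > 0 then appendBlankIf out
      else if prevIndent > 0 ∨ nextIndent > 0 then out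
      else if isImport prev ∧ !(isImport nxt) then appendBlankIf out
      else if isDefLike nxt ∨ isDefLike prev then appendBlankIf out
      else out

-- body of the defensive collapse pass (state: (final, prev_blank))
def defensiveStep (st : List String × Bool) (ln : String) : List String × Bool :=
  let isb := isBlankLine ln
  if isb && st.2 then st
  else (st.1 ++ [if isb then "" else ln], isb)

def compact_code_cell_source (source : List String) : List String :=
  let lines0 := source.map normLine
  let lines := popTrailing (popLeading lines0)
  if lines = [] then []
  else
    let out := (PySem.List.enumerate lines 0).foldl (aLoopBody lines) []
    let fin := (out.foldl defensiveStep ([], false)).1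
    popTrailing (popLeading fin)

-- ===== PORT B =====
-- _keep_blank(prev, nxt)
def keepBlank (prev nxt : String) : Bool :=
  let prevIndent := indentLevel prev
  let nextIndent := indentLevel nxt
  if nextIndent = 0 && isDefLike nxt && prevIndent > 0 then true
  else if prevIndent > 0 || nextIndent > 0 then false
  else if isImport prev && !(isImport nxt) then true
  else isDefLike nxt || isDefLike prev

-- body of B's single forward pass (state: (out, prev, gap))
def bLoopBody (st : List String × Option String × Bool) (cur : String) : List String × Option String × Bool :=
  if isBlankLine cur then (st.1, st.2.1, true)
  else
    let out := match st.2.1 with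
      | some p => if st.2.2 && keepBlank p cur then st.1 ++ [""] else st.1
      | none => st.1
    (out ++ [cur], some cur, false)

def compact_code_cell_source_alt (source : List String) : List String :=
  ((source.map normLine).foldl bLoopBody ([], none, false)).1

-- ===== PRECONDITION & SPEC =====
def Spec_compact_code_cell_source (source : List String) (out : List String) : Prop := out = compact_code_cell_source_alt source
instance (source : List String) (out : List String) : Decidable (Spec_compact_code_cell_source source out) := by unfold Spec_compact_code_cell_source; infer_instance

-- ===== CLAIM (what is proved, stated in full; the proofs are below) =====
def Claim_equal_compact_code_cell_source : Prop := ∀ (source : List String), Dom_compact_code_cell_source source → Spec_compact_code_cell_source source (compact_code_cell_source source)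

-- ===== LEMMAS AND PROOFS =====

-- last nonblank element of a prefix / first nonblank element of a suffix
def lastNB (l : List String) : Option String := l.reverse.find? (fun s => !(isBlankLine s))
def firstNB (l : List String) : Option String := l.find? (fun s => !(isBlankLine s))

theorem blank_empty : isBlankLine "" = true := by decide

theorem lastNB_append (l : List String) (c : String) :
    lastNB (l ++ [c]) = if isBlankLine c then lastNB l else some c := by
  simp [lastNB, List.find?_cons]
  split_ifs with h <;> simp [h]

theorem firstNB_cons (c : String) (l : List String) :
    firstNB (c :: l) = if isBlankLine c then firstNB l else some c := by
  simp [firstNB, List.find?_cons]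
  split_ifs with h <;> simp [h]

theorem scanPrev_spec (t : List String) (i : Nat) (h : i ≤ t.length) :
    (scanPrev t ((i : Int) - 1) = -1 ∧ lastNB (t.take i) = none) ∨
    (∃ p, lastNB (t.take i) = some p ∧ 0 ≤ scanPrev t ((i : Int) - 1) ∧
      scanPrev t ((i : Int) - 1) < i ∧
      PySem.List.pyGetD t (scanPrev t ((i : Int) - 1)) "" = p) := by
  induction i with
  | zero =>
    left
    rw [scanPrev]
    simp [lastNB]
  | succ i ih =>
    have hi : i < t.length := by omega
    have hg : PySem.List.pyGetD t (i : Int) "" = t[i] := by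
      rw [PySem.List.pyGetD_natCast, List.getD_eq_getElem?_getD]
      simp [hi]
    have htake : t.take (i + 1) = t.take i ++ [t[i]] := by
      rw [List.take_add_one]
      simp [hi]
    have e : ((i : Nat) + 1 : Int) - 1 = (i : Int) := by ring
    push_cast
    rw [e, scanPrev, htake, lastNB_append]
    by_cases hb : isBlankLine t[i] = true
    · rw [dif_pos ⟨by omega, by rw [hg]; exact hb⟩, if_pos hb]
      rcases ih (by omega) with ⟨h1, h2⟩ | ⟨p, h1, h2, h3, h4⟩
      · left; exact ⟨h1, h2⟩
      · right
        exact ⟨by rw [h4]; exact h1, h2, by omega, rfl⟩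
    · rw [dif_neg (by rw [hg]; intro hc; exact hb hc.2), if_neg hb]
      right
      exact ⟨by rw [hg], by omega, by omega, rfl⟩

theorem scanNext_spec (t : List String) (i : Nat) (h : i ≤ t.length) :
    (scanNext t (i : Int) = t.length ∧ firstNB (t.drop i) = none) ∨
    (∃ q, firstNB (t.drop i) = some q ∧ 0 ≤ scanNext t (i : Int) ∧
      scanNext t (i : Int) < t.length ∧
      PySem.List.pyGetD t (scanNext t (i : Int)) "" = q) := by
  have H : ∀ (d i : Nat), i ≤ t.length → t.length - i = d →
      (scanNext t (i : Int) = t.length ∧ firstNB (t.drop i) = none) ∨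
      (∃ q, firstNB (t.drop i) = some q ∧ 0 ≤ scanNext t (i : Int) ∧
        scanNext t (i : Int) < t.length ∧
        PySem.List.pyGetD t (scanNext t (i : Int)) "" = q) := by
    intro d
    induction d with
    | zero =>
      intro i hle hd
      have : i = t.length := by omega
      subst this
      left
      rw [scanNext]
      simp [firstNB]
    | succ d ihd =>
      intro i hle hd
      have hi : i < t.length := by omega
      have hg : PySem.List.pyGetD t (i : Int) "" = t[i] := by
        rw [PySem.List.pyGetD_natCast, List.getD_eq_getElem?_getD]
        simp [hi]
      have hdrop : t.drop i = t[i] :: t.drop (i + 1) := List.drop_eq_getElem_cons hi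
      rw [scanNext, hdrop, firstNB_cons]
      by_cases hb : isBlankLine t[i] = true
      · rw [if_pos hb, dif_pos ⟨by simp [PySem.List.len_eq]; omega, by rw [hg]; exact hb⟩]
        have hcast : (i : Int) + 1 = ((i + 1 : Nat) : Int) := by push_cast; ring
        rw [hcast]
        exact ihd (i + 1) (by omega) (by omega)
      · rw [if_neg hb, dif_neg (by rw [hg]; intro hc; exact hb hc.2)]
        right
        exact ⟨t[i], rfl, by omega, by exact_mod_cast hi, hg⟩
  exact H (t.length - i) i h rfl

-- A's pending blank: "" already emitted by A for the current run, not yet by B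
def pend (prev : Option String) (gap : Bool) (suf : List String) : List String :=
  match prev, firstNB suf with
  | some p, some q => if gap && keepBlank p q then [""] else []
  | _, _ => []

theorem aStep_nonblank (t acc : List String) (i : Int) (cur : String) (hb : isBlankLine cur = false) :
    aLoopBody t acc (i, cur) = acc ++ [cur] := by
  simp [aLoopBody, hb]

theorem aStep_skip (t acc : List String) (i : Int) (cur : String) (hb : isBlankLine cur = true)
    (h : scanPrev t (i - 1) < 0 ∨ PySem.List.len t ≤ scanNext t (i + 1)) :
    aLoopBody t acc (i, cur) = acc := by
  unfold aLoopBody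
  rw [if_neg (by simp [hb]), if_pos h]

theorem aStep_blank (t acc : List String) (i : Int) (cur p q : String) (hb : isBlankLine cur = true)
    (hj0 : ¬ scanPrev t (i - 1) < 0) (hk0 : ¬ PySem.List.len t ≤ scanNext t (i + 1))
    (hp : PySem.List.pyGetD t (scanPrev t (i - 1)) "" = p)
    (hq : PySem.List.pyGetD t (scanNext t (i + 1)) "" = q) :
    aLoopBody t acc (i, cur) = if keepBlank p q = true then appendBlankIf acc else acc := by
  unfold aLoopBody
  rw [if_neg (by simp [hb]), if_neg (not_or.mpr ⟨hj0, hk0⟩)]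
  simp only [hp, hq]
  simp only [keepBlank]
  split_ifs <;> first | rfl | (simp_all; done) | skip
  all_goals (exfalso; simp only [Bool.and_eq_true, Bool.or_eq_true, decide_eq_true_eq] at *; tauto)

theorem appendBlankIf_of_last_blankfree (out : List String) (hne : out ≠ [])
    (h : ∀ x, out.getLast? = some x → isBlankLine x = false) :
    appendBlankIf out = out ++ [""] := by
  cases hout : out.getLast? with
  | none => exact absurd (List.getLast?_eq_none_iff.mp hout) hne
  | some x =>
    have hxne : x ≠ "" := by
      intro he
      subst he
      have := h _ hout
      rw [blank_empty] at this
      cases this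
    unfold appendBlankIf
    rw [hout]
    simp [hxne]

theorem appendBlankIf_last_empty (out : List String) :
    appendBlankIf (out ++ [""]) = out ++ [""] := by
  unfold appendBlankIf
  rw [List.getLast?_append_of_ne_nil _ (by simp)]
  simp

theorem pend_none (gap : Bool) (suf : List String) : pend none gap suf = [] := by
  unfold pend
  cases firstNB suf <;> rfl

theorem pend_some (p : String) (gap : Bool) (suf : List String) (q : String)
    (h : firstNB suf = some q) :
    pend (some p) gap suf = if gap && keepBlank p q then [""] else [] := by
  unfold pend
  rw [h]

theorem pend_some_none (p : String) (gap : Bool) (suf : List String)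
    (h : firstNB suf = none) : pend (some p) gap suf = [] := by
  unfold pend
  rw [h]

theorem main_loop_eq (suf : List String) : ∀ (pre outB : List String) (prev : Option String) (gap : Bool),
    prev = lastNB pre →
    (outB = [] ↔ prev = none) →
    (∀ x, outB.getLast? = some x → isBlankLine x = false) →
    (PySem.List.enumerate suf (pre.length : Int)).foldl (aLoopBody (pre ++ suf)) (outB ++ pend prev gap suf)
      = (suf.foldl bLoopBody (outB, prev, gap)).1 := by
  induction suf with
  | nil =>
    intro pre outB prev gap h1 h2 h3
    have hpend : pend prev gap [] = [] := by
      cases prev with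
      | none => exact pend_none gap []
      | some p => exact pend_some_none p gap [] rfl
    rw [hpend, List.append_nil]
    simp [PySem.List.enumerate]
  | cons cur tail ih =>
    intro pre outB prev gap h1 h2 h3
    have hassoc : pre ++ cur :: tail = (pre ++ [cur]) ++ tail := by simp
    have hcast : ((pre ++ [cur]).length : Int) = (pre.length : Int) + 1 := by
      simp
    rw [PySem.List.enumerate_cons, List.foldl_cons, List.foldl_cons]
    by_cases hb : isBlankLine cur = true
    · -- blank line
      have hstepB : bLoopBody (outB, prev, gap) cur = (outB, prev, true) := by
        simp [bLoopBody, hb]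
      rw [hstepB]
      have h1' : prev = lastNB (pre ++ [cur]) := by rw [lastNB_append, if_pos hb]; exact h1
      have htake : (pre ++ cur :: tail).take pre.length = pre := List.take_left
      have hdrop : (pre ++ cur :: tail).drop (pre.length + 1) = tail := by
        rw [hassoc, show pre.length + 1 = (pre ++ [cur]).length by simp, List.drop_left]
      have hcast2 : (pre.length : Int) + 1 = (((pre.length + 1 : Nat) : Int)) := by push_cast; ring
      rcases scanPrev_spec (pre ++ cur :: tail) pre.length (by simp) with ⟨hj, hlast⟩ | ⟨p, hlast, hj0, hjlt, hpv⟩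
      · -- no nonblank before: prev = none
        rw [htake] at hlast
        have hprev : prev = none := by rw [h1, hlast]
        subst hprev
        have hstepA := aStep_skip (pre ++ cur :: tail) (outB ++ pend none gap (cur :: tail))
          (pre.length : Int) cur hb (Or.inl (by omega))
        rw [hstepA, pend_none, List.append_nil]
        have := ih (pre ++ [cur]) outB none true h1' h2 h3
        rw [pend_none, List.append_nil, hcast, ← hassoc] at this
        exact this
      · rw [htake] at hlast
        have hprev : prev = some p := by rw [h1, hlast]
        subst hprev
        rcases scanNext_spec (pre ++ cur :: tail) (pre.length + 1) (by simp) with ⟨hk, hfirst⟩ | ⟨q, hfirst, hk0, hklt, hqv⟩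
        · -- no nonblank after
          rw [hdrop] at hfirst
          have hstepA := aStep_skip (pre ++ cur :: tail) (outB ++ pend (some p) gap (cur :: tail))
            (pre.length : Int) cur hb (Or.inr (by rw [PySem.List.len_eq, hcast2]; omega))
          rw [hstepA, pend_some_none p gap _ (by rw [firstNB_cons, if_pos hb]; exact hfirst),
            List.append_nil]
          have := ih (pre ++ [cur]) outB (some p) true h1' h2 h3
          rw [pend_some_none p true _ hfirst, List.append_nil, hcast, ← hassoc] at this
          exact this
        · rw [hdrop] at hfirst
          have hpend1 : pend (some p) gap (cur :: tail) = (if gap && keepBlank p q then [""] else []) :=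
            pend_some p gap _ q (by rw [firstNB_cons, if_pos hb]; exact hfirst)
          have hpend2 : pend (some p) true tail = (if keepBlank p q then [""] else []) := by
            rw [pend_some p true tail q hfirst]; simp
          have hkint : ¬ PySem.List.len (pre ++ cur :: tail) ≤ scanNext (pre ++ cur :: tail) ((pre.length : Int) + 1) := by
            rw [PySem.List.len_eq, hcast2]; omega
          have hstepA := aStep_blank (pre ++ cur :: tail) (outB ++ pend (some p) gap (cur :: tail))
            (pre.length : Int) cur p q hb (by omega) hkint hpv (by rw [hcast2]; exact hqv)
          rw [hstepA]
          have hkey : (if keepBlank p q = true then appendBlankIf (outB ++ pend (some p) gap (cur :: tail))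
              else outB ++ pend (some p) gap (cur :: tail)) = outB ++ pend (some p) true tail := by
            rw [hpend1, hpend2]
            by_cases hkeep : keepBlank p q = true
            · rw [if_pos hkeep]
              by_cases hgap : gap = true
              · rw [if_pos (by simp [hgap, hkeep]), if_pos (by simp [hkeep])]
                exact appendBlankIf_last_empty outB
              · have hgap' : gap = false := by simpa using hgap
                rw [hgap']
                simp only [Bool.false_and, Bool.false_eq_true, if_false, List.append_nil]
                rw [if_pos (by simp [hkeep])]
                have hne : outB ≠ [] := fun hc => absurd (h2.mp hc) (by simp)
                exact appendBlankIf_of_last_blankfree outB hne h3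
            · have hkeep' : keepBlank p q = false := by simpa using hkeep
              rw [if_neg hkeep]
              simp [hkeep']
          rw [hkey]
          have := ih (pre ++ [cur]) outB (some p) true h1' h2 h3
          rw [hcast, ← hassoc] at this
          exact this
    · -- nonblank line
      have hb' : isBlankLine cur = false := by simpa using hb
      rw [aStep_nonblank _ _ _ _ hb']
      have hfc : firstNB (cur :: tail) = some cur := by rw [firstNB_cons, if_neg (by simp [hb'])]
      have hstepB : bLoopBody (outB, prev, gap) cur
          = (outB ++ pend prev gap (cur :: tail) ++ [cur], some cur, false) := by
        cases prev with
        | none => simp [bLoopBody, hb', pend_none]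
        | some p =>
          rw [pend_some p gap _ cur hfc]
          by_cases hgk : (gap && keepBlank p cur) = true
          · simp [bLoopBody, hb', hgk]
          · have hgk' : (gap && keepBlank p cur) = false := by simpa using hgk
            simp [bLoopBody, hb', hgk']
      rw [hstepB]
      have h1' : some cur = lastNB (pre ++ [cur]) := by
        rw [lastNB_append, if_neg (by simp [hb'])]
      have := ih (pre ++ [cur]) (outB ++ pend prev gap (cur :: tail) ++ [cur]) (some cur) false
        h1' (by simp) (by intro x hx; simp at hx; rw [← hx]; exact hb')
      rw [hcast, ← hassoc] at this
      have hpend0 : pend (some cur) false tail = [] := by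
        cases hf : firstNB tail with
        | none => exact pend_some_none cur false tail hf
        | some z => rw [pend_some cur false tail z hf]; simp
      rw [hpend0, List.append_nil] at this
      exact this

-- B's fold-state invariant, strong enough for the defensive/trim passes to be identities
def BInv (st : List String × Option String × Bool) : Prop :=
  (st.1 = [] ↔ st.2.1 = none) ∧
  (∀ x, st.1.getLast? = some x → isBlankLine x = false) ∧
  (∀ x, st.1.head? = some x → isBlankLine x = false) ∧
  st.1.IsChain (fun a b => ¬(isBlankLine a = true ∧ isBlankLine b = true)) ∧
  (∀ x ∈ st.1, isBlankLine x = true → x = "")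

theorem bInv_step (st : List String × Option String × Bool) (cur : String) (h : BInv st) :
    BInv (bLoopBody st cur) := by
  obtain ⟨h1, h2, h3, h4, h5⟩ := h
  by_cases hb : isBlankLine cur = true
  · have hstep : bLoopBody st cur = (st.1, st.2.1, true) := by simp [bLoopBody, hb]
    rw [hstep]
    exact ⟨h1, h2, h3, h4, h5⟩
  · cases hp : st.2.1 with
    | none =>
      have hnil : st.1 = [] := h1.mpr hp
      have hstep : bLoopBody st cur = ([cur], some cur, false) := by
        simp [bLoopBody, hb, hp, hnil]
      rw [hstep]
      refine ⟨by simp, ?_, ?_, by simp, ?_⟩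
      · intro x hx; simp at hx; subst hx; simpa using hb
      · intro x hx; simp at hx; subst hx; simpa using hb
      · intro x hx hbx; simp at hx; subst hx; exact absurd hbx hb
    | some p =>
      have hne : st.1 ≠ [] := fun hc => by simp [h1.mp hc] at hp
      have hcur : isBlankLine cur = false := by simpa using hb
      by_cases hg : (st.2.2 && keepBlank p cur) = true
      · have hstep : bLoopBody st cur = (st.1 ++ ["", cur], some cur, false) := by
          simp [bLoopBody, hb, hp, hg]
        rw [hstep]
        refine ⟨by simp, ?_, ?_, ?_, ?_⟩
        · intro x hx; simp at hx; subst hx; exact hcur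
        · intro x hx
          obtain ⟨a, t, ha⟩ := List.exists_cons_of_ne_nil hne
          rw [ha] at hx
          simp at hx
          exact h3 x (by rw [ha]; simpa using hx)
        · rw [List.isChain_append]
          refine ⟨h4, ?_, ?_⟩
          · rw [List.isChain_cons]
            constructor
            · intro y hy; simp at hy; subst hy; simp [hcur]
            · simp
          · intro x hx y hy
            simp at hy; subst hy
            intro hc
            have := h2 x (by simpa using hx)
            simp [this] at hc
        · intro x hx hbx
          simp at hx
          rcases hx with hx | hx | hx
          · exact h5 x hx hbx
          · exact hx
          · subst hx; exact absurd hbx hb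
      · have hg' : (st.2.2 && keepBlank p cur) = false := by simpa using hg
        have hstep : bLoopBody st cur = (st.1 ++ [cur], some cur, false) := by
          simp [bLoopBody, hb, hp, hg']
        rw [hstep]
        refine ⟨by simp, ?_, ?_, ?_, ?_⟩
        · intro x hx; simp at hx; subst hx; exact hcur
        · intro x hx
          obtain ⟨a, t, ha⟩ := List.exists_cons_of_ne_nil hne
          rw [ha] at hx
          simp at hx
          exact h3 x (by rw [ha]; simpa using hx)
        · rw [List.isChain_append]
          refine ⟨h4, by simp, ?_⟩
          intro x hx y hy
          simp at hy; subst hy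
          intro hc
          exact absurd hc.2 hb
        · intro x hx hbx
          simp at hx
          rcases hx with hx | hx
          · exact h5 x hx hbx
          · subst hx; exact absurd hbx hb

theorem bInv_fold (ls : List String) : ∀ st, BInv st → BInv (ls.foldl bLoopBody st) := by
  induction ls with
  | nil => intro st h; exact h
  | cons cur tail ih => intro st h; exact ih _ (bInv_step st cur h)

theorem defensive_go (out : List String) : ∀ (acc : List String) (pb : Bool),
    (∀ x ∈ out, isBlankLine x = true → x = "") →
    out.IsChain (fun a b => ¬(isBlankLine a = true ∧ isBlankLine b = true)) →
    (pb = true → ∀ x, out.head? = some x → isBlankLine x = false) →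
    (out.foldl defensiveStep (acc, pb)).1 = acc ++ out := by
  induction out with
  | nil => intro acc pb _ _ _; simp
  | cons h t ih =>
    intro acc pb hmem hch hpb
    rw [List.isChain_cons] at hch
    by_cases hb : isBlankLine h = true
    · have hpb' : pb = false := by
        by_contra hc
        have := hpb (by simpa using hc) h rfl
        simp [hb] at this
      have he : h = "" := hmem h (by simp) hb
      have hstep : defensiveStep (acc, pb) h = (acc ++ [h], true) := by
        simp [defensiveStep, hpb', he, blank_empty]
      rw [List.foldl_cons, hstep,
        ih (acc ++ [h]) true (fun x hx hbx => hmem x (by simp [hx]) hbx) hch.2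
          (fun _ x hx => by
            have hr := hch.1 x (Option.mem_def.mpr hx)
            rcases Bool.eq_false_or_eq_true (isBlankLine x) with h' | h'
            · exact absurd ⟨hb, h'⟩ hr
            · exact h')]
      simp
    · have hstep : defensiveStep (acc, pb) h = (acc ++ [h], isBlankLine h) := by
        simp [defensiveStep, hb]
      rw [List.foldl_cons, hstep,
        ih (acc ++ [h]) (isBlankLine h) (fun x hx hbx => hmem x (by simp [hx]) hbx) hch.2
          (fun hc => absurd hc hb)]
      simp

theorem defensive_id (out : List String)
    (h1 : ∀ x ∈ out, isBlankLine x = true → x = "")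
    (h2 : out.IsChain (fun a b => ¬(isBlankLine a = true ∧ isBlankLine b = true))) :
    (out.foldl defensiveStep ([], false)).1 = out := by
  rw [defensive_go out [] false h1 h2 (by intro hc; cases hc)]
  simp

theorem dropWhile_id_of_head (p : String → Bool) (l : List String)
    (h : ∀ x, l.head? = some x → p x = false) : l.dropWhile p = l := by
  cases l with
  | nil => rfl
  | cons a t => rw [List.dropWhile_cons_of_neg]; simp [h a rfl]

theorem popLeading_id (out : List String) (h : ∀ x, out.head? = some x → isBlankLine x = false) :
    popLeading out = out := dropWhile_id_of_head _ _ h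

theorem popTrailing_id (out : List String) (h : ∀ x, out.getLast? = some x → isBlankLine x = false) :
    popTrailing out = out := by
  unfold popTrailing
  rw [dropWhile_id_of_head _ _ (by intro x hx; exact h x (by rwa [List.head?_reverse] at hx))]
  simp

theorem bfold_gap (rest : List String) : ∀ (g₁ g₂ : Bool),
    (rest.foldl bLoopBody ([], none, g₁)).1 = (rest.foldl bLoopBody ([], none, g₂)).1 := by
  induction rest with
  | nil => intro g₁ g₂; rfl
  | cons cur tail ih =>
    intro g₁ g₂
    by_cases hb : isBlankLine cur = true
    · have hstep : ∀ g : Bool, bLoopBody (([] : List String), none, g) cur = ([], none, true) := by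
        intro g; simp [bLoopBody, hb]
      rw [List.foldl_cons, List.foldl_cons, hstep, hstep]
    · have hstep : ∀ g : Bool, bLoopBody (([] : List String), none, g) cur = ([cur], some cur, false) := by
        intro g; simp [bLoopBody, hb]
      rw [List.foldl_cons, List.foldl_cons, hstep, hstep]

theorem bfold_leading (pre : List String) : ∀ (rest : List String) (g : Bool),
    (∀ x ∈ pre, isBlankLine x = true) →
    ((pre ++ rest).foldl bLoopBody ([], none, g)).1 = (rest.foldl bLoopBody ([], none, false)).1 := by
  induction pre with
  | nil => intro rest g _; exact bfold_gap rest g false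
  | cons x xs ih =>
    intro rest g hall
    have hx : isBlankLine x = true := hall x (by simp)
    have hstep : bLoopBody (([] : List String), none, g) x = ([], none, true) := by
      simp [bLoopBody, hx]
    rw [List.cons_append, List.foldl_cons, hstep]
    exact ih rest true (fun y hy => hall y (by simp [hy]))

theorem bfold_trailing (post : List String) : ∀ st,
    (∀ x ∈ post, isBlankLine x = true) →
    (post.foldl bLoopBody st).1 = st.1 := by
  induction post with
  | nil => intro st _; rfl
  | cons x xs ih =>
    intro st hall
    have hx : isBlankLine x = true := hall x (by simp)
    have hstep : bLoopBody st x = (st.1, st.2.1, true) := by simp [bLoopBody, hx]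
    rw [List.foldl_cons, hstep, ih _ (fun y hy => hall y (by simp [hy]))]

-- ===== VERDICT (by name: the statement is the Claim_ definition above) =====
theorem bcore_trim (src : List String) :
    ((src.map normLine).foldl bLoopBody ([], none, false)).1
      = ((popTrailing (popLeading (src.map normLine))).foldl bLoopBody ([], none, false)).1 := by
  set L := src.map normLine with hL
  have hsplit1 : L = L.takeWhile isBlankLine ++ popLeading L := by
    rw [popLeading]
    exact (List.takeWhile_append_dropWhile).symm
  have hlead : (L.foldl bLoopBody ([], none, false)).1
      = ((popLeading L).foldl bLoopBody ([], none, false)).1 := by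
    conv_lhs => rw [hsplit1]
    exact bfold_leading _ _ false (fun x hx => List.mem_takeWhile_imp hx)
  have hsplit2 : popLeading L
      = popTrailing (popLeading L) ++ ((popLeading L).reverse.takeWhile isBlankLine).reverse := by
    unfold popTrailing
    conv_lhs => rw [← List.reverse_reverse (popLeading L),
      ← List.takeWhile_append_dropWhile (p := isBlankLine) (l := (popLeading L).reverse)]
    rw [List.reverse_append]
  have htrail : ((popLeading L).foldl bLoopBody ([], none, false)).1
      = ((popTrailing (popLeading L)).foldl bLoopBody ([], none, false)).1 := by
    conv_lhs => rw [hsplit2]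
    rw [List.foldl_append]
    exact bfold_trailing _ _ (fun x hx => List.mem_takeWhile_imp (List.mem_reverse.mp hx))
  rw [hlead, htrail]

theorem compact_code_cell_source_spec : Claim_equal_compact_code_cell_source := by
  intro src _hdom
  unfold Spec_compact_code_cell_source
  simp only [compact_code_cell_source, compact_code_cell_source_alt]
  rw [bcore_trim src]
  set T := popTrailing (popLeading (src.map normLine)) with hT
  by_cases hTe : T = []
  · rw [if_pos hTe, hTe]
    rfl
  · rw [if_neg hTe]
    have hmain := main_loop_eq T [] [] none false rfl (by simp) (by intro x hx; simp at hx)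
    rw [pend_none] at hmain
    simp only [List.nil_append, List.length_nil, Nat.cast_zero] at hmain
    obtain ⟨i1, i2, i3, i4, i5⟩ := bInv_fold T ([], none, false)
      ⟨by simp, by intro x hx; simp at hx, by intro x hx; simp at hx, by simp, by intro x hx; simp at hx⟩
    rw [hmain, defensive_id _ i5 i4, popLeading_id _ i3, popTrailing_id _ i2]
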